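-- pv_equiv track=rewrite | github.com/gaivrt/VoiceLibra | parser.py | get_first_paragraph
-- ===== SOURCE A (Python) =====
-- def get_first_paragraph(text: str, max_length: int = 200) -> str:
--     """
--     Extract the first meaningful paragraph from text, limited to max_length characters.
--     Tries to break at sentence boundary if possible.
--     """
--     # Split into paragraphs (by double newlines)
--     paragraphs = [p.strip() for p in text.split('\n\n')]
--     # Find first non-empty paragraph
--     for para in paragraphs:
--         if para:
--             # If paragraph is too long, try to break at sentence boundary
--             if len(para) > max_length:
--                 # Simple sentence splitting (for Chinese and English)
--                 sentences = []
--                 current = ""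
--                 for char in para:
--                     current += char
--                     if char in '。.!?！？':
--                         sentences.append(current)
--                         current = ""
--                         if len(''.join(sentences)) >= max_length:
--                             break
--                 if sentences:
--                     return ''.join(sentences)
--                 # If can't break at sentence, just truncate
--                 return para[:max_length] + '...'
--             return para
--     return ""
-- ===== SOURCE B (Python) =====
-- def _sentences(para):
--     """Tokenize para into terminator-ended sentences (trailing fragment dropped)."""
--     sents = []
--     start = 0
--     for i, ch in enumerate(para):
--         if ch in '。.!?！？':
--             sents.append(para[start:i + 1])
--             start = i + 1
--     return sents
--
--
-- def get_first_paragraph(text: str, max_length: int = 200) -> str: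
--     for para in (p.strip() for p in text.split('\n\n')):
--         if not para:
--             continue
--         if len(para) <= max_length:
--             return para
--         sentences = _sentences(para)
--         if not sentences:
--             return para[:max_length] + '...'
--         result = ""
--         for s in sentences:
--             result += s
--             if len(result) >= max_length:
--                 break
--         return result
--     return ""
-- ===== Notes on version B (the rewrite author's own statement) =====
-- stated objective: alternative
-- what changed: A's single combined char-scan that builds sentences and breaks at max_length is replaced by a tokenize-then-accumulate decomposition: an index/slice-based pass collects all terminator-ended sentences, then a separate loop concatenates them until max_length is reached (avoiding A's re-join of all accumulated sentences at every terminator).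
import Mathlib
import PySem

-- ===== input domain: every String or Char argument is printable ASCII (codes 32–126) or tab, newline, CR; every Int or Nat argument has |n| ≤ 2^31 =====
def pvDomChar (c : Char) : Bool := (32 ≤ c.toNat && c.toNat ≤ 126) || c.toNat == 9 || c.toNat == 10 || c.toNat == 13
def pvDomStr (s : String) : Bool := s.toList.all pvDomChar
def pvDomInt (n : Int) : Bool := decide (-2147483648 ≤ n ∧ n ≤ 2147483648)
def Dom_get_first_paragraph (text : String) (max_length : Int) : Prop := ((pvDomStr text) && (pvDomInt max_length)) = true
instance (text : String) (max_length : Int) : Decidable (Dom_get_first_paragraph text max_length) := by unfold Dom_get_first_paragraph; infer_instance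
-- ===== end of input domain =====

-- B replaces A's single combined char-scan (build sentences and break at max_length in one loop)
-- by a tokenize-then-accumulate decomposition (alternative; equal return values proved below).

-- shared helper: `char in '。.!?！？'`
def pvTerm (c : Char) : Bool := c ∈ "。.!?！？".toList

-- ===== PORT A =====
-- A's inner `for char in para` loop: state = (current, sentences); early `break` returns sentences
def aLoop (maxl : Int) : List Char → List Char → List (List Char) → List (List Char)
  | [], _, sents => sents
  | c :: rest, cur, sents =>
    let cur2 := cur ++ [c]
    if pvTerm c then
      let sents2 := sents ++ [cur2]
      if ((PySem.Chars.join [] sents2).length : Int) ≥ maxl then sents2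
      else aLoop maxl rest [] sents2
    else aLoop maxl rest cur2 sents

-- A's `for para in paragraphs` loop with its early returns
def aFind (maxl : Int) : List (List Char) → List Char
  | [] => []
  | para :: rest =>
    if para ≠ [] then
      if (para.length : Int) > maxl then
        let sents := aLoop maxl para [] []
        if sents ≠ [] then PySem.Chars.join [] sents
        else PySem.List.slice para none (some maxl) ++ "...".toList
      else para
    else aFind maxl rest

def get_first_paragraph (text : String) (max_length : Int) : String :=
  let paragraphs := (PySem.Chars.splitOn text.toList "\n\n".toList).map PySem.Chars.strip
  String.ofList (aFind max_length paragraphs)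

-- ===== PORT B =====
-- B's `_sentences`: one enumerate pass collecting slice-based sentences; state = (sents, start)
def bSent (cs : List Char) : List (List Char) :=
  ((PySem.List.enumerate cs 0).foldl
    (fun (st : List (List Char) × Int) p =>
      if pvTerm p.2 then (st.1 ++ [PySem.List.slice cs (some st.2) (some (p.1 + 1))], p.1 + 1)
      else st)
    ([], 0)).1

-- B's accumulation loop: result += s, break once len(result) >= max_length
def bAcc (maxl : Int) : List (List Char) → List Char → List Char
  | [], res => res
  | s :: rest, res =>
    let res2 := res ++ s
    if (res2.length : Int) ≥ maxl then res2 else bAcc maxl rest res2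

-- B's paragraph loop
def bFind (maxl : Int) : List (List Char) → List Char
  | [] => []
  | para :: rest =>
    if para ≠ [] then
      if (para.length : Int) ≤ maxl then para
      else
        let sents := bSent para
        if sents = [] then PySem.List.slice para none (some maxl) ++ "...".toList
        else bAcc maxl sents []
    else bFind maxl rest

def get_first_paragraph_alt (text : String) (max_length : Int) : String :=
  let paragraphs := (PySem.Chars.splitOn text.toList "\n\n".toList).map PySem.Chars.strip
  String.ofList (bFind max_length paragraphs)

-- ===== PRECONDITION & SPEC =====
def Spec_get_first_paragraph (text : String) (max_length : Int) (out : String) : Prop :=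
  out = get_first_paragraph_alt text max_length
instance (text : String) (max_length : Int) (out : String) : Decidable (Spec_get_first_paragraph text max_length out) := by
  unfold Spec_get_first_paragraph; infer_instance

-- ===== CLAIM =====
def Claim_equal_get_first_paragraph : Prop :=
  ∀ (text : String) (max_length : Int), Dom_get_first_paragraph text max_length →
    Spec_get_first_paragraph text max_length (get_first_paragraph text max_length)

-- ===== LEMMAS AND PROOFS =====

-- reference tokenizer (proof-only): the char-accumulating form of B's `_sentences`
def tok : List Char → List Char → List (List Char)
  | [], _ => []
  | c :: rest, cur => if pvTerm c then (cur ++ [c]) :: tok rest [] else tok rest (cur ++ [c])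

theorem join_nil_eq_flatten (l : List (List Char)) : PySem.Chars.join [] l = l.flatten := by
  induction l with
  | nil => rfl
  | cons x xs ih =>
    cases xs with
    | nil => simp [PySem.Chars.join, List.intercalate]
    | cons y ys =>
      simp only [PySem.Chars.join, List.intercalate, List.intersperse] at *
      simp_all

-- A's inner loop, flattened, is B's accumulate over the token list
theorem aLoop_eq_bAcc (maxl : Int) (cs cur : List Char) (sents : List (List Char)) :
    (aLoop maxl cs cur sents).flatten = bAcc maxl (tok cs cur) sents.flatten := by
  induction cs generalizing cur sents with
  | nil => simp [aLoop, tok, bAcc]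
  | cons c rest ih =>
    simp only [aLoop, tok, join_nil_eq_flatten]
    by_cases h : pvTerm c
    · simp only [h, if_true, bAcc, List.flatten_append, List.flatten_cons, List.flatten_nil,
        List.append_nil]
      split_ifs with h2
      · simp
      · exact ih [] (sents ++ [cur ++ [c]]) |>.trans (by simp)
    · simp only [h, Bool.false_eq_true, if_false]
      exact ih (cur ++ [c]) sents

-- A's sentence list is empty iff the token list is (and the starting sentence list was)
theorem aLoop_eq_nil_iff (maxl : Int) (cs cur : List Char) (sents : List (List Char)) :
    aLoop maxl cs cur sents = [] ↔ (sents = [] ∧ tok cs cur = []) := by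
  induction cs generalizing cur sents with
  | nil => simp [aLoop, tok]
  | cons c rest ih =>
    simp only [aLoop, tok]
    by_cases h : pvTerm c
    · simp only [h, if_true]
      split_ifs with h2 <;> simp [ih]
    · simp only [h, Bool.false_eq_true, if_false]; exact ih _ _

theorem take_succ_of_drop {α : Type} (L : List α) (n : Nat) (c : α) (r : List α)
    (h : L.drop n = c :: r) : L.take (n + 1) = L.take n ++ [c] := by
  have hc : L[n]? = some c := by
    have h0 : (L.drop n)[0]? = L[n + 0]? := List.getElem?_drop
    simpa [h] using h0.symm
  simp [List.take_add_one, hc]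

-- invariant of B's tokenizing fold: start index m, position k, pending chunk cs[m:k]
theorem bSent_gen (cs : List Char) (suf : List Char) : ∀ (k m : Nat) (acc : List (List Char)),
    cs.drop k = suf → m ≤ k →
    ((PySem.List.enumerate suf (k:Int)).foldl
      (fun (st : List (List Char) × Int) p =>
        if pvTerm p.2 then (st.1 ++ [PySem.List.slice cs (some st.2) (some (p.1 + 1))], p.1 + 1)
        else st)
      (acc, (m:Int))).1
      = acc ++ tok suf ((cs.drop m).take (k - m)) := by
  induction suf generalizing cs with
  | nil => intro k m acc _ _; simp [PySem.List.enumerate_nil, tok]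
  | cons c rest ih =>
    intro k m acc hdrop hmk
    have hdrop' : cs.drop (k + 1) = rest := by
      have h1 := congrArg (List.drop 1) hdrop
      simpa [List.drop_drop, Nat.add_comm] using h1
    have hLd : (cs.drop m).drop (k - m) = c :: rest := by
      rw [List.drop_drop]
      have h2 : m + (k - m) = k := by omega
      rw [h2]; exact hdrop
    have hcur : (cs.drop m).take (k - m + 1) = (cs.drop m).take (k - m) ++ [c] :=
      take_succ_of_drop _ _ _ _ hLd
    rw [PySem.List.enumerate_cons]
    simp only [List.foldl_cons]
    have hcast : ((k:Int) + 1) = ((k+1 : Nat) : Int) := by push_cast; ring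
    by_cases h : pvTerm c
    · simp only [h, if_true]
      rw [hcast]
      have hslice : PySem.List.slice cs (some ((m:Nat):Int)) (some ((k+1 : Nat):Int)) =
          (cs.drop m).take (k + 1 - m) := PySem.List.slice_natCast cs m (k+1)
      have hih := ih cs (k+1) (k+1) (acc ++ [PySem.List.slice cs (some (m:Int)) (some ((k+1:Nat):Int))]) hdrop' (le_refl _)
      rw [hih]
      have h3 : k + 1 - m = (k - m) + 1 := by omega
      rw [hslice, h3, hcur]
      simp [tok, h]
    · simp only [h, Bool.false_eq_true, if_false]
      rw [hcast]
      have hih := ih cs (k+1) m acc hdrop' (by omega)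
      rw [hih]
      have h3 : k + 1 - m = (k - m) + 1 := by omega
      rw [h3, hcur]
      simp [tok, h]

theorem bSent_eq_tok (cs : List Char) : bSent cs = tok cs [] := by
  unfold bSent
  have h := bSent_gen cs cs 0 0 [] (by simp) (le_refl 0)
  simpa using h

theorem aFind_eq_bFind (maxl : Int) (ps : List (List Char)) : aFind maxl ps = bFind maxl ps := by
  induction ps with
  | nil => rfl
  | cons para rest ih =>
    simp only [aFind, bFind]
    by_cases hp : para = []
    · simp [hp, ih]
    · simp only [hp, ne_eq, not_false_iff, if_true]
      by_cases hl : (para.length : Int) > maxl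
      · have hl' : ¬ ((para.length : Int) ≤ maxl) := by omega
        simp only [hl, if_true, hl', if_false]
        by_cases ht : tok para [] = []
        · have ha : aLoop maxl para [] [] = [] := by
            rw [aLoop_eq_nil_iff]; exact ⟨rfl, ht⟩
          have hb : bSent para = [] := by rw [bSent_eq_tok]; exact ht
          simp [ha, hb]
        · have ha : aLoop maxl para [] [] ≠ [] := by
            rw [ne_eq, aLoop_eq_nil_iff]; simp [ht]
          have hb : bSent para ≠ [] := by rw [bSent_eq_tok]; exact ht
          simp only [ha, hb, if_false]
          have := aLoop_eq_bAcc maxl para [] []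
          simp only [List.flatten_nil] at this
          rw [join_nil_eq_flatten, this, bSent_eq_tok]
          simp
      · have hl' : (para.length : Int) ≤ maxl := by omega
        simp [hl, hl']
    
-- ===== VERDICT =====
theorem get_first_paragraph_spec : Claim_equal_get_first_paragraph := by
  intro text maxl _
  unfold Spec_get_first_paragraph get_first_paragraph get_first_paragraph_alt
  simp only [aFind_eq_bFind]
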